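-- pv_equiv track=rewrite | github.com/brennhill/gasoline-mcp-ai-devtools | pypi/kaboom-agentic-browser/kaboom_agentic_browser/doctor.py | _build_summary
-- ===== SOURCE A (Python) =====
-- def _build_summary(tools):
--     """Build a human-readable summary string from tool diagnostics."""
--     ok_count = sum(1 for t in tools if t["status"] == "ok")
--     error_count = sum(1 for t in tools if t["status"] == "error")
--     info_count = sum(1 for t in tools if t["status"] == "info")
--
--     summary = f"Summary: {ok_count} client{'s' if ok_count != 1 else ''} ready"
--     if error_count > 0:
--         summary += f", {error_count} need{'s' if error_count == 1 else ''} repair"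
--     if info_count > 0:
--         summary += f", {info_count} not detected"
--     return summary
-- ===== SOURCE B (Python) =====
-- def _build_summary(tools):
--     """Build a human-readable summary string from tool diagnostics."""
--     counts = {}
--     for t in tools:
--         s = t["status"]
--         counts[s] = counts.get(s, 0) + 1
--     ok_count = counts.get("ok", 0)
--     error_count = counts.get("error", 0)
--     info_count = counts.get("info", 0)
--
--     summary = f"Summary: {ok_count} client{'s' if ok_count != 1 else ''} ready"
--     if error_count > 0:
--         summary += f", {error_count} need{'s' if error_count == 1 else ''} repair"
--     if info_count > 0:
--         summary += f", {info_count} not detected"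
--     return summary
-- ===== Notes on version B (the rewrite author's own statement) =====
-- stated objective: idiomatic
-- what changed: Replaces three separate generator-sum scans over tools with one pass that builds a status frequency table, then reads the three counts from it.
import Mathlib
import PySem

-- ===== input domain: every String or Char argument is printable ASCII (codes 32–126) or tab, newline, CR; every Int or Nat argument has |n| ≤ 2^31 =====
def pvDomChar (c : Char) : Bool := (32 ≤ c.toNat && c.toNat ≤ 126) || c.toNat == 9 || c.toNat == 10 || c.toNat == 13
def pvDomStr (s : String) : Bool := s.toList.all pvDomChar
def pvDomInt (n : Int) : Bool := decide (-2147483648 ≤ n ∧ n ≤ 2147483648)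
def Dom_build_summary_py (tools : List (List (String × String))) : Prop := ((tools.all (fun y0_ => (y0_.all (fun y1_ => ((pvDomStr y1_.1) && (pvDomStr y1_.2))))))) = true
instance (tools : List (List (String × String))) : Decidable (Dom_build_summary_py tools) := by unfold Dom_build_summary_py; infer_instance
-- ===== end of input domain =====

-- B replaces A's three generator-sum scans by one pass building a status frequency table (idiomatic Counter style); same summary formatting.

-- t["status"] (total form; Pre_ guarantees the key is present, so the default is never read)
def statusOf (t : List (String × String)) : String := (PySem.Dict.mk t).getD "status" ""

-- shared summary-string assembly (identical f-string logic in A and B)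
def summaryFmt (ok_count error_count info_count : Int) : String :=
  let summary := "Summary: " ++ PySem.Int.toStr ok_count ++ " client" ++ (if ok_count != 1 then "s" else "") ++ " ready"
  let summary := if error_count > 0 then summary ++ ", " ++ PySem.Int.toStr error_count ++ " need" ++ (if error_count == 1 then "s" else "") ++ " repair" else summary
  let summary := if info_count > 0 then summary ++ ", " ++ PySem.Int.toStr info_count ++ " not detected" else summary
  summary

-- ===== PORT A =====
def build_summary_py (tools : List (List (String × String))) : String :=
  let ok_count : Int := tools.foldl (fun a t => if statusOf t == "ok" then a + 1 else a) 0
  let error_count : Int := tools.foldl (fun a t => if statusOf t == "error" then a + 1 else a) 0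
  let info_count : Int := tools.foldl (fun a t => if statusOf t == "info" then a + 1 else a) 0
  summaryFmt ok_count error_count info_count

-- ===== PORT B =====
def build_summary_py_alt (tools : List (List (String × String))) : String :=
  let counts : PySem.Dict String Int :=
    tools.foldl (fun d t => let s := statusOf t; d.insert s (d.getD s 0 + 1)) PySem.Dict.empty
  let ok_count : Int := counts.getD "ok" 0
  let error_count : Int := counts.getD "error" 0
  let info_count : Int := counts.getD "info" 0
  summaryFmt ok_count error_count info_count

-- ===== PRECONDITION & SPEC =====
-- Pre_ excludes tool dicts lacking the "status" key, on which A raises KeyError.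
def Pre_build_summary_py (tools : List (List (String × String))) : Prop :=
  (tools.all (fun t => t.any (fun p => p.1 == "status"))) = true
instance (tools : List (List (String × String))) : Decidable (Pre_build_summary_py tools) := by unfold Pre_build_summary_py; infer_instance

def pvWitness_build_summary_py : (List (List (String × String))) :=
  [[("status", "ok")], [("status", "error"), ("detail", "x")]]

def Spec_build_summary_py (tools : List (List (String × String))) (out : String) : Prop := out = build_summary_py_alt tools
instance (tools : List (List (String × String))) (out : String) : Decidable (Spec_build_summary_py tools out) := by unfold Spec_build_summary_py; infer_instance

-- ===== CLAIM (what is proved, stated in full; the proofs are below) =====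
def Claim_equal_build_summary_py : Prop := ∀ (tools : List (List (String × String))), Dom_build_summary_py tools → Pre_build_summary_py tools → Spec_build_summary_py tools (build_summary_py tools)

-- ===== LEMMAS AND PROOFS =====

-- A's conditional-sum fold counts occurrences of s among the statuses.
lemma foldl_if_count (tools : List (List (String × String))) (s : String) :
    tools.foldl (fun a t => if statusOf t == s then a + 1 else a) (0 : Int)
      = ((tools.map statusOf).count s : Int) := by
  induction tools using List.reverseRecOn with
  | nil => simp
  | append_singleton xs x ih =>
      by_cases h : statusOf x = s <;>
        · simp [List.foldl_append, List.count_append, h]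
          simpa using ih

-- B's one-pass table read at key s is the same count.
lemma counter_getD (l : List String) (s : String) :
    (l.foldl (fun d x => d.insert x (d.getD x 0 + 1)) PySem.Dict.empty).getD s 0
      = (l.count s : Int) := by
  rw [PySem.Dict.foldl_insert_getD_add_one_eq_counter, PySem.Dict.getD_counter]

-- ===== VERDICT (by name: the statement is the Claim_ definition above) =====
theorem build_summary_py_spec : Claim_equal_build_summary_py := by
  intro tools _ _
  show build_summary_py tools = build_summary_py_alt tools
  simp only [build_summary_py, build_summary_py_alt]
  rw [foldl_if_count, foldl_if_count, foldl_if_count]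
  rw [show (tools.foldl (fun (d : PySem.Dict String Int) t => d.insert (statusOf t) (d.getD (statusOf t) 0 + 1)) PySem.Dict.empty)
        = (tools.map statusOf).foldl (fun d x => d.insert x (d.getD x 0 + 1)) PySem.Dict.empty
      from (List.foldl_map (f := statusOf) (g := fun (d : PySem.Dict String Int) x => d.insert x (d.getD x 0 + 1))).symm,
    counter_getD, counter_getD, counter_getD]
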